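-- pv_equiv track=rewrite | github.com/stingram/Simple-Problems | Google/meeting_rooms_iii.py | find_busiest_room
-- ===== SOURCE A (Python) =====
-- from typing import List
-- import heapq
--
-- def find_busiest_room(N: int, meetings: List[List[int]]):
--     # Create idle heap
--     # Use index as key
--     idle = list(range(N))
--     heapq.heapify(idle)
--
--     # Create empty busy heap
--     # key will be when the room is free, the second value will be the index
--     busy = []
--
--     # define counts array
--     counts = [0]*N
--
--     # loop over meeetings
--     for start, end in meetings:
--         # first, check if any rooms need to be removed from busy and made idle
--         while busy and busy[0][0] <= start:
--             _, i = heapq.heappop(busy)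
--             heapq.heappush(idle, i)
--
--         # now we check if any rooms are free
--         if idle:
--             room_index = heapq.heappop(idle)
--             # push the end time for this meeting into busy heap
--             heapq.heappush(busy,(end,room_index))
--         else:
--             # we have no idle rooms so we need to update
--             # a busy room that will end the soonest
--             b_end, room_index = heapq.heappop(busy)
--             heapq.heappush(busy,(b_end+(end-start),room_index))
--
--         counts[room_index] += 1
--     most_booked_room = 0
--     for i, count in enumerate(counts):
--         if counts[most_booked_room] < count:
--             most_booked_room = i
--     return most_booked_room
-- ===== SOURCE B (Python) =====
-- from typing import List
--
--
-- def find_busiest_room(N: int, meetings: List[List[int]]):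
--     # Heap-free: one busy flag and one end time per room, linear scans pick rooms.
--     busy = [False] * N
--     ends = [0] * N
--     counts = [0] * N
--
--     for start, end in meetings:
--         # release every busy room whose meeting has finished
--         for i in range(N):
--             if busy[i] and ends[i] <= start:
--                 busy[i] = False
--
--         # lowest-index free room, if any
--         room = -1
--         for i in range(N):
--             if not busy[i]:
--                 room = i
--                 break
--
--         if room >= 0:
--             busy[room] = True
--             ends[room] = end
--         else:
--             # room with the smallest end time (ties: lowest index), extended
--             room = 0
--             for i in range(1, N):
--                 if ends[i] < ends[room]:
--                     room = i
--             ends[room] += end - start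
--
--         counts[room] += 1
--
--     best = 0
--     for i in range(N):
--         if counts[best] < counts[i]:
--             best = i
--     return best
-- ===== Notes on version B (the rewrite author's own statement) =====
-- stated objective: alternative
-- what changed: Replaces A's two heaps (idle-index heap and (end,room) busy heap) with a per-room busy-flag and end-time array updated by three plain linear scans per meeting (release finished rooms, pick lowest free index, else argmin end time with lowest-index tie-break), keeping the same first-max argmax over counts.
import Mathlib
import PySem

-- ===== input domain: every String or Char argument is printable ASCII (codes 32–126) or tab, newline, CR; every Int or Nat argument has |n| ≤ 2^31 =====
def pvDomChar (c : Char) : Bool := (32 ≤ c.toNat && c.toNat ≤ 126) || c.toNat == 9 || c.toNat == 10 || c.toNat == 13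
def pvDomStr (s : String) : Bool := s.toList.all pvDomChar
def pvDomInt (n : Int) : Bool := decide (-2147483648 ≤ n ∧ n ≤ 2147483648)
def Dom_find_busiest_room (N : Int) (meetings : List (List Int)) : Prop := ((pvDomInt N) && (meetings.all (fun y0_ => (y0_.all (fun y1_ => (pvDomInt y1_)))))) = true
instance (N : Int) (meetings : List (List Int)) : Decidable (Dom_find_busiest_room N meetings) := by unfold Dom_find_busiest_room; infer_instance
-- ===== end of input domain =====

-- B replaces A's two heaps by a per-room busy-flag/end-time array with linear scans (objective: alternative, same result).

-- ===== PORT A =====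
-- heapq is modeled by a sorted list: heappush = ordered insert, heap[0]/heappop = head
-- (exact for this code, which only observes the heap through its minimum).

-- ordered insert with an accumulator (stack-safe evaluation)
def insGo {α : Type} [LE α] [DecidableLE α] (x : α) : List α → List α → List α
  | [], acc => acc.reverse ++ [x]
  | y :: ys, acc => if x ≤ y then acc.reverse ++ x :: y :: ys else insGo x ys (y :: acc)

def heapPushI (x : Int) (h : List Int) : List Int := insGo x h []

def heapPushP (p : Lex (Int × Int)) (h : List (Lex (Int × Int))) : List (Lex (Int × Int)) :=
  insGo p h []

-- counts[k] += 1 (accumulator loop, stack-safe evaluation)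
def incGo : List Int → Int → List Int → List Int
  | [], _, acc => acc.reverse
  | c :: cs, k, acc => if k = 0 then acc.reverse ++ (c + 1) :: cs else incGo cs (k - 1) (c :: acc)

def incAt (cs : List Int) (k : Int) : List Int := incGo cs k []

-- while busy and busy[0][0] <= start: pop busy, push index onto idle
def drainA (start : Int) : List (Lex (Int × Int)) → List Int → List (Lex (Int × Int)) × List Int
  | [], idle => ([], idle)
  | p :: rest, idle =>
    if (ofLex p).1 ≤ start then drainA start rest (heapPushI (ofLex p).2 idle)
    else (p :: rest, idle)

-- one iteration of the `for start, end in meetings` loop; state = (idle, busy, counts)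
def stepA (st : List Int × List (Lex (Int × Int)) × List Int) (m : List Int) :
    List Int × List (Lex (Int × Int)) × List Int :=
  match m with
  | [start, stop] =>
    let d := drainA start st.2.1 st.1
    match d.2 with
    | room :: idle2 => (idle2, heapPushP (toLex (stop, room)) d.1, incAt st.2.2 room)
    | [] =>
      match d.1 with
      | [] => ([], [], st.2.2)  -- Python raises IndexError here (no room at all); outside Pre_
      | q :: busy2 =>
        ([], heapPushP (toLex ((ofLex q).1 + (stop - start), (ofLex q).2)) busy2,
          incAt st.2.2 (ofLex q).2)
  | _ => st  -- Python raises ValueError unpacking a non-pair; outside Pre_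

-- most_booked_room = 0; for i, count in enumerate(counts): ...
-- (enumerate is ported as a fold carrying the index; counts[most_booked_room] is read through
-- an Array view of the same list so evaluation is linear — the reads are the same values)
def mostBookedALoop (arr : Array Int) (counts : List Int) : Int :=
  (counts.foldl
    (fun (st : Int × Int) c =>
      (if arr.getD st.1.toNat 0 < c then st.2 else st.1, st.2 + 1))
    ((0 : Int), (0 : Int))).1

def mostBookedA (counts : List Int) : Int := mostBookedALoop counts.toArray counts

def find_busiest_room (N : Int) (meetings : List (List Int)) : Int :=
  -- idle = list(range(N)) (already a heap); busy = []; counts = [0]*N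
  mostBookedA (meetings.foldl stepA (PySem.List.pyRange 0 N 1, [], List.replicate N.toNat 0)).2.2

-- ===== PORT B =====
-- per-room busy flags and end times, three linear scans per meeting (no heaps)

-- release every busy room whose meeting has finished (pointwise update of the flags)
def releaseB (start : Int) (bs : List Bool) (es : List Int) : List Bool :=
  List.zipWith (fun b e => b && !(decide (e ≤ start))) bs es

-- lowest-index free room (-1 if none)
def firstFree : List Bool → Int → Int
  | [], _ => -1
  | b :: bs, k => if b then firstFree bs (k + 1) else k

-- room = 0; for i in range(1, N): if ends[i] < ends[room]: room = i
def argminLoop : List Int → Int → Int → Int → Int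
  | [], best, _, _ => best
  | e :: es, best, bv, k => if e < bv then argminLoop es k e (k + 1) else argminLoop es best bv (k + 1)

def argminE : List Int → Int
  | [] => 0  -- unreachable under Pre_ (only used when some room exists)
  | e :: es => argminLoop es 0 e 1

-- xs[k] = v (accumulator loop, stack-safe evaluation)
def setGo {α : Type} (v : α) : List α → Int → List α → List α
  | [], _, acc => acc.reverse
  | x :: xs, k, acc => if k = 0 then acc.reverse ++ v :: xs else setGo v xs (k - 1) (x :: acc)

def setAt {α : Type} (xs : List α) (k : Int) (v : α) : List α := setGo v xs k []

-- xs[k] += d (accumulator loop, stack-safe evaluation)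
def bumpGo (d : Int) : List Int → Int → List Int → List Int
  | [], _, acc => acc.reverse
  | x :: xs, k, acc => if k = 0 then acc.reverse ++ (x + d) :: xs else bumpGo d xs (k - 1) (x :: acc)

def bumpAt (xs : List Int) (k : Int) (d : Int) : List Int := bumpGo d xs k []

-- one iteration of B's meeting loop; state = (busy, ends, counts)
def stepB (st : List Bool × List Int × List Int) (m : List Int) :
    List Bool × List Int × List Int :=
  match m with
  | [start, stop] =>
    let busy1 := releaseB start st.1 st.2.1
    let r := firstFree busy1 0
    if r ≥ 0 then (setAt busy1 r true, setAt st.2.1 r stop, bumpAt st.2.2 r 1)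
    else
      let rm := argminE st.2.1
      (busy1, bumpAt st.2.1 rm (stop - start), bumpAt st.2.2 rm 1)
  | _ => st  -- Python raises ValueError unpacking a non-pair; outside Pre_

-- best = 0; for i in range(N): if counts[best] < counts[i]: best = i
-- (counts[...] is read through an Array view of the same list so evaluation is linear)
def bestRoomBLoop (arr : Array Int) (N : Int) : Int :=
  (PySem.List.pyRange 0 N 1).foldl
    (fun best i =>
      if arr.getD best.toNat 0 < arr.getD i.toNat 0 then i else best) 0

def bestRoomB (N : Int) (counts : List Int) : Int := bestRoomBLoop counts.toArray N

def find_busiest_room_alt (N : Int) (meetings : List (List Int)) : Int :=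
  bestRoomB N (meetings.foldl stepB
    (List.replicate N.toNat false, List.replicate N.toNat 0, List.replicate N.toNat 0)).2.2

-- ===== PRECONDITION & SPEC =====
-- Pre_ excludes inputs on which A raises: a meeting row that is not a [start, end] pair
-- (ValueError when unpacking), and a nonempty meeting list with no room (N < 1: IndexError
-- popping an empty heap).
def Pre_find_busiest_room (N : Int) (meetings : List (List Int)) : Prop :=
  (∀ m ∈ meetings, m.length = 2) ∧ (meetings = [] ∨ 1 ≤ N)

instance (N : Int) (meetings : List (List Int)) : Decidable (Pre_find_busiest_room N meetings) := by
  unfold Pre_find_busiest_room; infer_instance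

def pvWitness_find_busiest_room : Int × List (List Int) := (2, [[0, 10], [1, 3], [4, 6]])

def Spec_find_busiest_room (N : Int) (meetings : List (List Int)) (out : Int) : Prop :=
  out = find_busiest_room_alt N meetings

instance (N : Int) (meetings : List (List Int)) (out : Int) :
    Decidable (Spec_find_busiest_room N meetings out) := by
  unfold Spec_find_busiest_room; infer_instance

-- ===== CLAIM (what is proved, stated in full; the proofs are below) =====
def Claim_equal_find_busiest_room : Prop :=
  ∀ (N : Int) (meetings : List (List Int)), Dom_find_busiest_room N meetings →
    Pre_find_busiest_room N meetings →
    Spec_find_busiest_room N meetings (find_busiest_room N meetings)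

-- ===== LEMMAS AND PROOFS =====

-- spec-side views of B's state: the sorted list of free room indices, and the
-- (end, index) pairs of the busy rooms, in index order, starting at offset k
def freeOf : List Bool → Int → List Int
  | [], _ => []
  | b :: bs, k => if b then freeOf bs (k + 1) else k :: freeOf bs (k + 1)

def pairsOf : List Bool → List Int → Int → List (Lex (Int × Int))
  | b :: bs, e :: es, k =>
    if b then toLex (e, k) :: pairsOf bs es (k + 1) else pairsOf bs es (k + 1)
  | _, _, _ => []

-- all rooms busy: the pairs are just the enumerated end times
def enumP : List Int → Int → List (Lex (Int × Int))
  | [], _ => []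
  | e :: es, k => toLex (e, k) :: enumP es (k + 1)

-- proof-side companion of argminLoop carrying the (value, index) pair
def minPair : List Int → Int → Lex (Int × Int) → Lex (Int × Int)
  | [], _, cur => cur
  | e :: es, k, cur => minPair es (k + 1) (if e < (ofLex cur).1 then toLex (e, k) else cur)

-- the invariant tying A's heap state to B's array state (n = room count)
def InvAB (n : Nat) (a : List Int × List (Lex (Int × Int)) × List Int)
    (b : List Bool × List Int × List Int) : Prop :=
  b.1.length = n ∧ b.2.1.length = n ∧ a.2.2 = b.2.2 ∧
  a.1 = freeOf b.1 0 ∧ a.2.1.Pairwise (· ≤ ·) ∧ a.2.1.Perm (pairsOf b.1 b.2.1 0)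

theorem freeOf_cons_true (bs : List Bool) (k : Int) :
    freeOf (true :: bs) k = freeOf bs (k + 1) := by simp [freeOf]

theorem freeOf_cons_false (bs : List Bool) (k : Int) :
    freeOf (false :: bs) k = k :: freeOf bs (k + 1) := by simp [freeOf]

theorem insGo_acc {α : Type} [LE α] [inst : DecidableLE α] (x : α) :
    ∀ (ys acc : List α), insGo x ys acc = acc.reverse ++ List.orderedInsert (· ≤ ·) x ys := by
  intro ys
  induction ys with
  | nil => intro acc; simp [insGo, List.orderedInsert]
  | cons y ys ih =>
    intro acc
    unfold insGo List.orderedInsert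
    split
    · rfl
    · rw [ih (y :: acc)]
      simp
theorem heapPushI_eq (x : Int) (h : List Int) :
    heapPushI x h = List.orderedInsert (· ≤ ·) x h := by
  rw [heapPushI, insGo_acc]; rfl

theorem heapPushP_eq (p : Lex (Int × Int)) (h : List (Lex (Int × Int))) :
    heapPushP p h = List.orderedInsert (· ≤ ·) p h := by
  rw [heapPushP, insGo_acc]; rfl

theorem setGo_acc {α : Type} (v : α) : ∀ (xs : List α) (k : Int) (acc : List α),
    setGo v xs k acc = acc.reverse ++ setGo v xs k [] := by
  intro xs
  induction xs with
  | nil => intro k acc; simp [setGo]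
  | cons x xs ih =>
    intro k acc
    unfold setGo
    split
    · simp
    · rw [ih _ (x :: acc), ih _ [x]]
      simp

theorem setAt_cons {α : Type} (x : α) (xs : List α) (k : Int) (v : α) :
    setAt (x :: xs) k v = if k = 0 then v :: xs else x :: setAt xs (k - 1) v := by
  unfold setAt
  rw [show setGo v (x :: xs) k [] = if k = 0 then [].reverse ++ v :: xs
      else setGo v xs (k - 1) [x] from rfl]
  split
  · rfl
  · rw [setGo_acc v xs (k - 1) [x]]
    rfl

theorem bumpGo_acc (d : Int) : ∀ (xs : List Int) (k : Int) (acc : List Int),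
    bumpGo d xs k acc = acc.reverse ++ bumpGo d xs k [] := by
  intro xs
  induction xs with
  | nil => intro k acc; simp [bumpGo]
  | cons x xs ih =>
    intro k acc
    unfold bumpGo
    split
    · simp
    · rw [ih _ (x :: acc), ih _ [x]]
      simp

theorem bumpAt_cons (x : Int) (xs : List Int) (k d : Int) :
    bumpAt (x :: xs) k d = if k = 0 then (x + d) :: xs else x :: bumpAt xs (k - 1) d := by
  unfold bumpAt
  rw [show bumpGo d (x :: xs) k [] = if k = 0 then [].reverse ++ (x + d) :: xs
      else bumpGo d xs (k - 1) [x] from rfl]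
  split
  · rfl
  · rw [bumpGo_acc d xs (k - 1) [x]]
    rfl

theorem incGo_acc : ∀ (cs : List Int) (k : Int) (acc : List Int),
    incGo cs k acc = acc.reverse ++ incGo cs k [] := by
  intro cs
  induction cs with
  | nil => intro k acc; simp [incGo]
  | cons c cs ih =>
    intro k acc
    unfold incGo
    split
    · simp
    · rw [ih _ (c :: acc), ih _ [c]]
      simp

theorem incAt_cons (c : Int) (cs : List Int) (k : Int) :
    incAt (c :: cs) k = if k = 0 then (c + 1) :: cs else c :: incAt cs (k - 1) := by
  unfold incAt
  rw [show incGo (c :: cs) k [] = if k = 0 then [].reverse ++ (c + 1) :: cs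
      else incGo cs (k - 1) [c] from rfl]
  split
  · rfl
  · rw [incGo_acc cs (k - 1) [c]]
    rfl

theorem releaseB_length (s : Int) (bs : List Bool) (es : List Int) :
    (releaseB s bs es).length = min bs.length es.length := by
  simp [releaseB]

theorem setAt_length {α : Type} (v : α) : ∀ (xs : List α) (k : Int),
    (setAt xs k v).length = xs.length := by
  intro xs; induction xs with
  | nil => intro k; rfl
  | cons x xs ih => intro k; rw [setAt_cons]; split <;> simp [ih]

theorem bumpAt_length (d : Int) : ∀ (xs : List Int) (k : Int),
    (bumpAt xs k d).length = xs.length := by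
  intro xs; induction xs with
  | nil => intro k; rfl
  | cons x xs ih => intro k; rw [bumpAt_cons]; split <;> simp [ih]

theorem incAt_eq_bumpAt : ∀ (xs : List Int) (k : Int), incAt xs k = bumpAt xs k 1 := by
  intro xs; induction xs with
  | nil => intro k; rfl
  | cons x xs ih => intro k; rw [incAt_cons, bumpAt_cons]; split <;> simp [ih]

theorem freeOf_bound : ∀ (bs : List Bool) (k x : Int), x ∈ freeOf bs k →
    k ≤ x ∧ x < k + bs.length := by
  intro bs
  induction bs with
  | nil => intro k x hx; simp [freeOf] at hx
  | cons b bs ih =>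
    intro k x hx
    unfold freeOf at hx
    split at hx
    · have := ih (k + 1) x hx; simp; omega
    · simp at hx
      rcases hx with rfl | hx
      · simp only [List.length_cons]; push_cast; omega
      · have := ih (k + 1) x hx; simp; omega


theorem freeOf_pairwise : ∀ (bs : List Bool) (k : Int), (freeOf bs k).Pairwise (· < ·) := by
  intro bs
  induction bs with
  | nil => intro k; simp [freeOf]
  | cons b bs ih =>
    intro k
    unfold freeOf
    split
    · exact ih (k + 1)
    · exact List.Pairwise.cons (fun x hx => by have := freeOf_bound bs (k + 1) x hx; omega) (ih (k + 1))



theorem enumP_idx_bound : ∀ (es : List Int) (k : Int) (p : Lex (Int × Int)),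
    p ∈ enumP es k → k ≤ (ofLex p).2 := by
  intro es
  induction es with
  | nil => intro k p hp; simp [enumP] at hp
  | cons e es ih =>
    intro k p hp
    unfold enumP at hp
    simp at hp
    rcases hp with rfl | hp
    · simp
    · have := ih (k + 1) p hp; omega


theorem enumP_idx_pairwise : ∀ (es : List Int) (k : Int),
    (enumP es k).Pairwise (fun p q => (ofLex p).2 < (ofLex q).2) := by
  intro es
  induction es with
  | nil => intro k; simp [enumP]
  | cons e es ih =>
    intro k
    unfold enumP
    exact List.Pairwise.cons
      (fun p hp => by have := enumP_idx_bound es (k + 1) p hp; simp; omega) (ih (k + 1))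


theorem pairsOf_release : ∀ (bs : List Bool) (es : List Int) (s k : Int),
    pairsOf (releaseB s bs es) es k
      = (pairsOf bs es k).filter (fun p => !decide ((ofLex p).1 ≤ s)) := by
  intro bs
  induction bs with
  | nil => intro es s k; cases es <;> simp [releaseB, pairsOf]
  | cons b bs ih =>
    intro es s k
    cases es with
    | nil => simp [releaseB, pairsOf]
    | cons e es =>
      simp only [releaseB, List.zipWith_cons_cons] at *
      by_cases hb : b
      · by_cases hle : e ≤ s
        · simp [releaseB, pairsOf, hb, hle, ih]
        · simp [releaseB, pairsOf, hb, hle, ih]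
      · simp [releaseB, pairsOf, hb, ih]


theorem freeOf_release_perm : ∀ (bs : List Bool) (es : List Int) (s k : Int),
    es.length = bs.length →
    (freeOf (releaseB s bs es) k).Perm
      (freeOf bs k ++
        ((pairsOf bs es k).filter (fun p => decide ((ofLex p).1 ≤ s))).map
          (fun p => (ofLex p).2)) := by
  intro bs
  induction bs with
  | nil => intro es s k _; cases es <;> simp [releaseB, pairsOf, freeOf]
  | cons b bs ih =>
    intro es s k hlen
    cases es with
    | nil => simp at hlen
    | cons e es =>
      simp only [List.length_cons, Nat.add_right_cancel_iff] at hlen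
      simp only [releaseB, List.zipWith_cons_cons] at *
      by_cases hb : b
      · by_cases hle : e ≤ s
        · subst hb
          simp only [releaseB, freeOf, pairsOf, hle, decide_true, Bool.not_true,
            Bool.and_false, Bool.false_eq_true, if_true, if_false, List.filter_cons,
            ofLex_toLex, List.map_cons]
          exact ((ih es s (k + 1) hlen).cons k).trans List.perm_middle.symm
        · subst hb
          simp only [releaseB, freeOf, pairsOf, hle, decide_false, Bool.not_false,
            Bool.and_true, if_true, List.filter_cons, ofLex_toLex]
          simp only [Bool.false_eq_true, if_false]
          exact ih es s (k + 1) hlen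
      · simp only [Bool.not_eq_true] at hb
        subst hb
        simp only [releaseB, freeOf, pairsOf, Bool.false_and, Bool.false_eq_true,
          if_false]
        exact ((ih es s (k + 1) hlen).cons k).trans (by simp)


theorem drain_spec : ∀ (busy : List (Lex (Int × Int))) (s : Int) (idle : List Int),
    busy.Pairwise (· ≤ ·) →
    drainA s busy idle =
      (busy.filter (fun p => !decide ((ofLex p).1 ≤ s)),
       ((busy.filter (fun p => decide ((ofLex p).1 ≤ s))).map (fun p => (ofLex p).2)).foldl
         (fun acc i => heapPushI i acc) idle) := by
  intro busy
  induction busy with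
  | nil => intro s idle h; simp [drainA]
  | cons p rest ih =>
    intro s idle h
    have hrest := h.tail
    have hhead := List.pairwise_cons.mp h |>.1
    by_cases hle : (ofLex p).1 ≤ s
    · have := ih s (heapPushI (ofLex p).2 idle) hrest
      simp only [drainA, hle, if_true, this, List.filter_cons, decide_true,
        Bool.not_true, List.map_cons, List.foldl_cons]
      simp
    · have hall : ∀ q ∈ rest, ¬ (ofLex q).1 ≤ s := by
        intro q hq hqle
        have hpq := hhead q hq
        rcases Prod.Lex.le_iff.mp hpq with h1 | ⟨h1, _⟩
        · exact hle (le_trans (le_of_lt h1) hqle)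
        · exact hle (h1 ▸ hqle)
      have h1 : rest.filter (fun q => !decide ((ofLex q).1 ≤ s)) = rest :=
        List.filter_eq_self.mpr (fun q hq => by simp [hall q hq])
      have h2 : rest.filter (fun q => decide ((ofLex q).1 ≤ s)) = [] :=
        List.filter_eq_nil_iff.mpr (fun q hq => by simp [hall q hq])
      simp [drainA, hle, h1, h2]


theorem foldl_push_perm : ∀ (ys idle : List Int),
    (ys.foldl (fun acc i => heapPushI i acc) idle).Perm (idle ++ ys) := by
  intro ys
  induction ys with
  | nil => intro idle; simp
  | cons y ys ih =>
    intro idle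
    simp only [List.foldl_cons]
    refine (ih (heapPushI y idle)).trans ?_
    rw [heapPushI_eq]
    refine (List.Perm.append_right ys (List.perm_orderedInsert _ y idle)).trans ?_
    exact List.perm_middle.symm


theorem foldl_push_pairwise : ∀ (ys idle : List Int), idle.Pairwise (· ≤ ·) →
    (ys.foldl (fun acc i => heapPushI i acc) idle).Pairwise (· ≤ ·) := by
  intro ys
  induction ys with
  | nil => intro idle h; exact h
  | cons y ys ih =>
    intro idle h
    refine ih _ ?_
    show List.Pairwise (· ≤ ·) (heapPushI y idle)
    rw [heapPushI_eq]
    exact List.Pairwise.orderedInsert y idle h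


theorem int_sorted_eq : ∀ {l1 l2 : List Int}, l1.Perm l2 →
    l1.Pairwise (· ≤ ·) → l2.Pairwise (· ≤ ·) → l1 = l2 := by
  intro l1 l2 hp h1 h2
  exact hp.eq_of_pairwise (fun a b _ _ hab hba => le_antisymm hab hba) h1 h2

theorem firstFree_eq : ∀ (bs : List Bool) (k : Int),
    firstFree bs k = (freeOf bs k).headD (-1) := by
  intro bs
  induction bs with
  | nil => intro k; rfl
  | cons b bs ih =>
    intro k
    unfold firstFree freeOf
    split
    · exact ih (k + 1)
    · rfl


theorem freeOf_set_true : ∀ (bs : List Bool) (k j : Int), 0 ≤ j →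
    freeOf (setAt bs j true) k = (freeOf bs k).filter (fun x => decide (x ≠ k + j)) := by
  intro bs
  induction bs with
  | nil => intro k j hj; simp [setAt, setGo, freeOf]
  | cons b bs ih =>
    intro k j hj
    have hself : ∀ m : Int, m ≤ k →
        (freeOf bs (k + 1)).filter (fun x => decide (x ≠ m)) = freeOf bs (k + 1) := by
      intro m hm
      refine List.filter_eq_self.mpr (fun x hx => ?_)
      have := freeOf_bound bs (k + 1) x hx
      simp; omega
    by_cases hj0 : j = 0
    · subst hj0
      rw [show setAt (b :: bs) (0 : Int) true = true :: bs from by simp [setAt_cons]]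
      by_cases hb : b
      · subst hb
        rw [freeOf_cons_true]
        exact (hself (k + 0) (by omega)).symm
      · simp only [Bool.not_eq_true] at hb; subst hb
        rw [freeOf_cons_true, freeOf_cons_false, List.filter_cons,
          if_neg (by simp), hself (k + 0) (by omega)]
    · rw [show setAt (b :: bs) j true = b :: setAt bs (j - 1) true from by simp [setAt_cons, hj0]]
      have hkj : k + 1 + (j - 1) = k + j := by omega
      by_cases hb : b
      · subst hb
        rw [freeOf_cons_true, freeOf_cons_true, ih (k + 1) (j - 1) (by omega), hkj]
      · simp only [Bool.not_eq_true] at hb; subst hb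
        rw [freeOf_cons_false, freeOf_cons_false, List.filter_cons,
          if_pos (by simp; omega), ih (k + 1) (j - 1) (by omega), hkj]

theorem pairsOf_set : ∀ (bs : List Bool) (es : List Int) (k j e : Int), 0 ≤ j →
    es.length = bs.length → (k + j) ∈ freeOf bs k →
    (pairsOf (setAt bs j true) (setAt es j e) k).Perm (toLex (e, k + j) :: pairsOf bs es k) := by
  intro bs
  induction bs with
  | nil => intro es k j e hj hlen hmem; simp [freeOf] at hmem
  | cons b bs ih =>
    intro es k j e hj hlen hmem
    cases es with
    | nil => simp at hlen
    | cons e0 es =>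
      simp only [List.length_cons, Nat.add_right_cancel_iff] at hlen
      by_cases hj0 : j = 0
      · subst hj0
        have hb : b = false := by
          by_contra hb
          simp only [Bool.not_eq_false] at hb; subst hb
          simp only [freeOf, if_true] at hmem
          have := freeOf_bound bs (k + 1) _ hmem
          omega
        subst hb
        have h1 : setAt (false :: bs) 0 true = true :: bs := by simp [setAt_cons]
        have h2 : setAt (e0 :: es) 0 e = e :: es := by simp [setAt_cons]
        rw [h1, h2]
        simp only [pairsOf, Bool.false_eq_true, if_true, if_false]
        rw [show k + (0 : Int) = k by omega]
      · have h1 : setAt (b :: bs) j true = b :: setAt bs (j - 1) true := by simp [setAt_cons, hj0]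
        have h2 : setAt (e0 :: es) j e = e0 :: setAt es (j - 1) e := by simp [setAt_cons, hj0]
        rw [h1, h2]
        have hkj : k + 1 + (j - 1) = k + j := by omega
        by_cases hb : b
        · subst hb
          simp only [freeOf, if_true] at hmem
          have hrec := ih es (k + 1) (j - 1) e (by omega) hlen (by rwa [hkj])
          simp only [pairsOf, if_true]
          rw [hkj] at hrec
          refine ((hrec.cons (toLex (e0, k))).trans ?_)
          exact List.Perm.swap _ _ _
        · simp only [Bool.not_eq_true] at hb; subst hb
          simp only [freeOf, Bool.false_eq_true, if_false] at hmem
          have hmem' : k + j ∈ freeOf bs (k + 1) := by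
            rcases List.mem_cons.mp hmem with h | h
            · omega
            · exact h
          have hrec := ih es (k + 1) (j - 1) e (by omega) hlen (by rwa [hkj])
          simp only [pairsOf, Bool.false_eq_true, if_false]
          rw [hkj] at hrec
          exact hrec


theorem pairsOf_of_freeOf_nil : ∀ (bs : List Bool) (es : List Int) (k : Int),
    freeOf bs k = [] → es.length = bs.length → pairsOf bs es k = enumP es k := by
  intro bs
  induction bs with
  | nil => intro es k h hlen; cases es with
    | nil => rfl
    | cons e es => simp at hlen
  | cons b bs ih =>
    intro es k h hlen
    cases es with
    | nil => simp at hlen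
    | cons e es =>
      simp only [List.length_cons, Nat.add_right_cancel_iff] at hlen
      have hb : b = true := by
        by_contra hb
        simp only [Bool.not_eq_true] at hb; subst hb
        simp [freeOf] at h
      subst hb
      simp only [freeOf, if_true] at h
      simp only [pairsOf, enumP, if_true]
      rw [ih es (k + 1) h hlen]


theorem map_ite_idx_id : ∀ (l : List (Lex (Int × Int))) (t : Int)
    (g : Lex (Int × Int) → Lex (Int × Int)),
    (∀ p ∈ l, (ofLex p).2 ≠ t) →
    l.map (fun p => if (ofLex p).2 = t then g p else p) = l := by
  intro l
  induction l with
  | nil => intro t g h; rfl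
  | cons p l ih =>
    intro t g h
    simp only [List.map_cons]
    rw [if_neg (h p (by simp)), ih t g (fun q hq => h q (by simp [hq]))]


theorem enumP_bump : ∀ (es : List Int) (k j d : Int), 0 ≤ j →
    enumP (bumpAt es j d) k
      = (enumP es k).map
          (fun p => if (ofLex p).2 = k + j then toLex ((ofLex p).1 + d, (ofLex p).2) else p) := by
  intro es
  induction es with
  | nil => intro k j d hj; rfl
  | cons e es ih =>
    intro k j d hj
    by_cases hj0 : j = 0
    · subst hj0
      have h1 : bumpAt (e :: es) 0 d = (e + d) :: es := by simp [bumpAt_cons]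
      rw [h1]
      simp only [enumP, List.map_cons, ofLex_toLex]
      rw [if_pos (by omega)]
      rw [map_ite_idx_id (enumP es (k + 1)) (k + 0) _
        (fun p hp => by have := enumP_idx_bound es (k + 1) p hp; omega)]
    · have h1 : bumpAt (e :: es) j d = e :: bumpAt es (j - 1) d := by simp [bumpAt_cons, hj0]
      rw [h1]
      simp only [enumP, List.map_cons, ofLex_toLex]
      rw [if_neg (by omega)]
      have hkj : k + 1 + (j - 1) = k + j := by omega
      rw [ih (k + 1) (j - 1) d (by omega), hkj]


theorem argminLoop_eq_minPair : ∀ (es : List Int) (best bv k : Int),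
    argminLoop es best bv k = (ofLex (minPair es k (toLex (bv, best)))).2 := by
  intro es
  induction es with
  | nil => intro best bv k; simp [argminLoop, minPair]
  | cons e es ih =>
    intro best bv k
    unfold argminLoop minPair
    simp only [ofLex_toLex]
    split
    · exact ih k e (k + 1)
    · exact ih best bv (k + 1)


theorem minPair_min : ∀ (es : List Int) (k : Int) (cur : Lex (Int × Int)),
    (ofLex cur).2 < k →
    minPair es k cur ∈ cur :: enumP es k ∧ minPair es k cur ≤ cur ∧
      ∀ p ∈ enumP es k, minPair es k cur ≤ p := by
  intro es
  induction es with
  | nil =>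
    intro k cur h
    refine ⟨by simp [minPair], le_refl _, by simp [enumP]⟩
  | cons e es ih =>
    intro k cur h
    unfold minPair
    by_cases hlt : e < (ofLex cur).1
    · rw [if_pos hlt]
      have hc : (ofLex (toLex (e, k) : Lex (Int × Int))).2 < k + 1 := by simp
      obtain ⟨hm, hle, hall⟩ := ih (k + 1) (toLex (e, k)) hc
      have hek : (toLex (e, k) : Lex (Int × Int)) ≤ cur :=
        le_of_lt (by rw [Prod.Lex.lt_iff]; left; simpa using hlt)
      refine ⟨?_, le_trans hle hek, ?_⟩
      · rcases List.mem_cons.mp hm with h1 | h1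
        · simp [enumP, h1]
        · simp [enumP, h1]
      · intro p hp
        simp only [enumP, List.mem_cons] at hp
        rcases hp with rfl | hp
        · exact hle
        · exact hall p hp
    · rw [if_neg hlt]
      have hc : (ofLex cur).2 < k + 1 := by omega
      obtain ⟨hm, hle, hall⟩ := ih (k + 1) cur hc
      have hek : cur ≤ (toLex (e, k) : Lex (Int × Int)) := by
        rw [Prod.Lex.le_iff]
        simp only [ofLex_toLex]
        rcases lt_or_eq_of_le (not_lt.mp hlt) with h1 | h1
        · exact Or.inl h1
        · exact Or.inr ⟨h1, le_of_lt h⟩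
      refine ⟨?_, hle, ?_⟩
      · rcases List.mem_cons.mp hm with h1 | h1
        · simp [h1]
        · simp [enumP, h1]
      · intro p hp
        simp only [enumP, List.mem_cons] at hp
        rcases hp with rfl | hp
        · exact le_trans hle hek
        · exact hall p hp


theorem freeOf_replicate : ∀ (n : Nat) (k : Int),
    freeOf (List.replicate n false) k = PySem.List.pyRange k (k + n) 1 := by
  intro n
  induction n with
  | zero =>
    intro k
    rw [show k + ((0 : Nat) : Int) = k by simp]
    rw [PySem.List.pyRange_one_eq_nil (le_refl k)]
    rfl
  | succ n ih =>
    intro k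
    rw [List.replicate_succ, freeOf_cons_false, ih (k + 1)]
    rw [PySem.List.pyRange_one_cons (show k < k + ((n + 1 : Nat) : Int) by push_cast; omega)]
    congr 1
    push_cast
    ring_nf

theorem pairsOf_replicate_false : ∀ (n : Nat) (es : List Int) (k : Int),
    pairsOf (List.replicate n false) es k = [] := by
  intro n
  induction n with
  | zero => intro es k; cases es <;> rfl
  | succ n ih =>
    intro es k
    cases es with
    | nil => rfl
    | cons e es =>
      simp only [List.replicate_succ, pairsOf, Bool.false_eq_true, if_false]
      exact ih es (k + 1)


theorem stepAB (n : Nat) (hn : 1 ≤ n) (a : List Int × List (Lex (Int × Int)) × List Int)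
    (b : List Bool × List Int × List Int) (s e : Int) (h : InvAB n a b) :
    InvAB n (stepA a [s, e]) (stepB b [s, e]) := by
  obtain ⟨idle, busy, cA⟩ := a
  obtain ⟨bs, es, cB⟩ := b
  obtain ⟨hlb, hles, hcnt, hidle, hbsort, hbperm⟩ := h
  simp only at hlb hles hcnt hidle hbsort hbperm
  -- after the release / drain phase
  have hlb1 : (releaseB s bs es).length = n := by rw [releaseB_length, hlb, hles]; exact Nat.min_self n
  have hd := drain_spec busy s idle hbsort
  have hbusy1sort : (busy.filter (fun p => !decide ((ofLex p).1 ≤ s))).Pairwise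
      (· ≤ · : Lex (Int × Int) → Lex (Int × Int) → Prop) := hbsort.filter _
  have hbusy1perm : (busy.filter (fun p => !decide ((ofLex p).1 ≤ s))).Perm
      (pairsOf (releaseB s bs es) es 0) := by
    rw [pairsOf_release]
    exact hbperm.filter _
  have hfreeSorted : ∀ (bs' : List Bool), (freeOf bs' 0).Pairwise (· ≤ · : Int → Int → Prop) :=
    fun bs' => (freeOf_pairwise bs' 0).imp le_of_lt
  have hidle1sort : ((((busy.filter (fun p => decide ((ofLex p).1 ≤ s))).map
        (fun p => (ofLex p).2)).foldl (fun acc i => heapPushI i acc) idle)).Pairwise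
      (· ≤ · : Int → Int → Prop) :=
    foldl_push_pairwise _ idle (hidle ▸ hfreeSorted bs)
  have hidle1eq : (((busy.filter (fun p => decide ((ofLex p).1 ≤ s))).map
        (fun p => (ofLex p).2)).foldl (fun acc i => heapPushI i acc) idle)
      = freeOf (releaseB s bs es) 0 := by
    refine int_sorted_eq ?_ hidle1sort (hfreeSorted _)
    refine (foldl_push_perm _ idle).trans ?_
    rw [hidle]
    refine (List.Perm.append (List.Perm.refl _) ((hbperm.filter _).map _)).trans ?_
    exact (freeOf_release_perm bs es s 0 (by omega)).symm
  have hA : stepA (idle, busy, cA) [s, e] =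
      (match freeOf (releaseB s bs es) 0 with
        | room :: idle2 =>
          (idle2, heapPushP (toLex (e, room)) (busy.filter (fun p => !decide ((ofLex p).1 ≤ s))),
            incAt cA room)
        | [] =>
          match busy.filter (fun p => !decide ((ofLex p).1 ≤ s)) with
          | [] => ([], [], cA)
          | q :: busy2 =>
            ([], heapPushP (toLex ((ofLex q).1 + (e - s), (ofLex q).2)) busy2,
              incAt cA (ofLex q).2)) := by
    simp only [stepA, hd, hidle1eq]
  cases hfo : freeOf (releaseB s bs es) 0 with
  | cons r rest =>
    have hrmem : r ∈ freeOf (releaseB s bs es) 0 := by rw [hfo]; exact List.mem_cons_self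
    have hrb := freeOf_bound _ 0 r hrmem
    have hff : firstFree (releaseB s bs es) 0 = r := by rw [firstFree_eq, hfo]; rfl
    have hB : stepB (bs, es, cB) [s, e] =
        (setAt (releaseB s bs es) r true, setAt es r e, bumpAt cB r 1) := by
      simp only [stepB, hff]
      rw [if_pos (by omega)]
    rw [hA, hB, hfo]
    refine ⟨by rw [setAt_length]; exact hlb1, by rw [setAt_length]; exact hles, ?_, ?_, ?_, ?_⟩
    · simp only
      rw [incAt_eq_bumpAt, hcnt]
    · simp only
      rw [freeOf_set_true _ 0 r (by omega), hfo, List.filter_cons,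
        if_neg (by simp), List.filter_eq_self.mpr]
      intro x hx
      have hpw := freeOf_pairwise (releaseB s bs es) 0
      rw [hfo] at hpw
      have := (List.pairwise_cons.mp hpw).1 x hx
      simp; omega
    · simp only
      rw [heapPushP_eq]
      exact List.Pairwise.orderedInsert _ _ hbusy1sort
    · simp only
      rw [heapPushP_eq]
      refine (List.perm_orderedInsert _ _ _).trans ?_
      refine (hbusy1perm.cons _).trans ?_
      have hps := pairsOf_set (releaseB s bs es) es 0 r e (by omega) (by omega) (by rwa [zero_add])
      rw [zero_add] at hps
      exact hps.symm
  | nil =>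
    have hlen' : es.length = (releaseB s bs es).length := by omega
    have hpe : pairsOf (releaseB s bs es) es 0 = enumP es 0 :=
      pairsOf_of_freeOf_nil _ es 0 hfo hlen'
    cases es with
    | nil => exfalso; simp at hles; omega
    | cons e0 es' =>
      have hne : enumP (e0 :: es') 0 ≠ [] := by simp [enumP]
      rw [hpe] at hbusy1perm
      cases hb1 : busy.filter (fun p => !decide ((ofLex p).1 ≤ s)) with
      | nil => exfalso; rw [hb1] at hbusy1perm; exact hne (hbusy1perm.symm.eq_nil)
      | cons q rest =>
        rw [hb1] at hbusy1perm hbusy1sort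
        -- q is the least element of enumP (e0 :: es') 0
        obtain ⟨hmMem, hmLe, hmAll⟩ := minPair_min es' 1 (toLex (e0, 0)) (by simp)
        have hmAll' : ∀ p ∈ enumP (e0 :: es') 0, minPair es' 1 (toLex (e0, 0)) ≤ p := by
          intro p hp
          simp only [enumP, List.mem_cons] at hp
          rcases hp with rfl | hp
          · exact hmLe
          · exact hmAll p hp
        have hmMem' : minPair es' 1 (toLex (e0, 0)) ∈ enumP (e0 :: es') 0 := by
          rcases List.mem_cons.mp hmMem with h1 | h1
        -- minPair is either the initial candidate (e0,0) or an element of the tail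
          · rw [h1]; simp [enumP]
          · simp [enumP, h1]
        have hq : q = minPair es' 1 (toLex (e0, 0)) := by
          have h1 : q ≤ minPair es' 1 (toLex (e0, 0)) := by
            have : minPair es' 1 (toLex (e0, 0)) ∈ q :: rest := hbusy1perm.symm.subset hmMem'
            rcases List.mem_cons.mp this with h2 | h2
            · rw [h2]
            · exact (List.pairwise_cons.mp hbusy1sort).1 _ h2
          have h2 : minPair es' 1 (toLex (e0, 0)) ≤ q :=
            hmAll' q (hbusy1perm.subset List.mem_cons_self)
          exact le_antisymm h1 h2
        have hrm : argminE (e0 :: es') = (ofLex q).2 := by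
          show argminLoop es' 0 e0 1 = _
          rw [argminLoop_eq_minPair, hq]
        have hrm0 : 0 ≤ (ofLex q).2 :=
          enumP_idx_bound _ 0 q (hbusy1perm.subset List.mem_cons_self)
        have hff : firstFree (releaseB s bs (e0 :: es')) 0 = -1 := by
          rw [firstFree_eq, hfo]; rfl
        have hB : stepB (bs, e0 :: es', cB) [s, e] =
            (releaseB s bs (e0 :: es'),
             bumpAt (e0 :: es') (argminE (e0 :: es')) (e - s),
             bumpAt cB (argminE (e0 :: es')) 1) := by
          simp only [stepB, hff]
          rw [if_neg (by omega)]
        rw [hA, hB, hfo, hb1, hrm]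
        have hsub : ∀ p ∈ rest, (ofLex p).2 ≠ 0 + (ofLex q).2 := by
          have hpw : ((enumP (e0 :: es') 0).map (fun p => (ofLex p).2)).Nodup := by
            have h1 : ((enumP (e0 :: es') 0).map (fun p => (ofLex p).2)).Pairwise (· < ·) :=
              List.pairwise_map.mpr (enumP_idx_pairwise (e0 :: es') 0)
            exact h1.imp (fun h => ne_of_lt h)
          have hnd : ((q :: rest).map (fun p => (ofLex p).2)).Nodup :=
            ((hbusy1perm.map (fun p => (ofLex p).2)).symm).nodup hpw
          simp only [List.map_cons, List.nodup_cons] at hnd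
          intro p hp hcontra
          exact hnd.1 (by
            rw [List.mem_map]
            exact ⟨p, hp, by omega⟩)
        refine ⟨hlb1, by rw [bumpAt_length]; exact hles, ?_, hfo.symm, ?_, ?_⟩
        · simp only
          rw [incAt_eq_bumpAt, hcnt]
        · simp only
          rw [heapPushP_eq]
          exact List.Pairwise.orderedInsert _ _ (List.pairwise_cons.mp hbusy1sort).2
        · simp only
          have hlenb : (bumpAt (e0 :: es') (ofLex q).2 (e - s)).length
              = (releaseB s bs (e0 :: es')).length := by rw [bumpAt_length]; omega
          rw [heapPushP_eq, pairsOf_of_freeOf_nil _ _ 0 hfo hlenb,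
            enumP_bump (e0 :: es') 0 ((ofLex q).2) (e - s) hrm0]
          refine (List.perm_orderedInsert _ _ _).trans ?_
          refine List.Perm.trans ?_ (hbusy1perm.map _)
          rw [List.map_cons,
            map_ite_idx_id rest (0 + (ofLex q).2) _ hsub,
            if_pos (by omega)]


theorem foldAB (n : Nat) (hn : 1 ≤ n) (ms : List (List Int))
    (hms : ∀ m ∈ ms, m.length = 2) :
    ∀ (a : List Int × List (Lex (Int × Int)) × List Int)
      (b : List Bool × List Int × List Int), InvAB n a b →
      InvAB n (ms.foldl stepA a) (ms.foldl stepB b) := by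
  intro a b h
  induction ms generalizing a b with
  | nil => exact h
  | cons m ms ih =>
    obtain ⟨s, e, rfl⟩ : ∃ s e, m = [s, e] := by
      have := hms m (by simp)
      match m, this with
      | [s, e], _ => exact ⟨s, e, rfl⟩
    exact ih (fun m hm => hms m (by simp [hm])) _ _ (stepAB n hn a b s e h)

theorem stepB_counts_len (st : List Bool × List Int × List Int) (m : List Int) :
    ((stepB st m).2.2).length = st.2.2.length := by
  rcases m with _ | ⟨s, _ | ⟨e, _ | ⟨x, r⟩⟩⟩ <;> simp only [stepB]
  split <;> simp [bumpAt_length]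

theorem foldl_stepB_counts_len (ms : List (List Int)) :
    ∀ (st : List Bool × List Int × List Int),
      ((ms.foldl stepB st).2.2).length = st.2.2.length := by
  induction ms with
  | nil => intro st; rfl
  | cons m ms ih => intro st; rw [List.foldl_cons, ih, stepB_counts_len]

-- the Array view reads the same values as pyGetD (for a nonnegative index)
theorem arr_getD (counts : List Int) (mb : Int) (h : 0 ≤ mb) :
    counts.toArray.getD mb.toNat 0 = PySem.List.pyGetD counts mb 0 := by
  by_cases hlt : mb.toNat < counts.length
  · rw [PySem.List.pyGetD_eq_getElem counts 0 h (by omega)]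
    simp [Array.getD, hlt]
  · have hL : counts.toArray.getD mb.toNat 0 = 0 := by simp [Array.getD, hlt]
    rw [hL, show mb = ((mb.toNat : Nat) : Int) by omega, PySem.List.pyGetD_natCast,
      List.getD_eq_default _ _ (by omega)]

-- the index-carrying Array fold of mostBookedA computes the fold over enumerate
theorem fold_arrA (counts : List Int) : ∀ (l : List Int) (mb i : Int), 0 ≤ mb → 0 ≤ i →
    (l.foldl
      (fun (st : Int × Int) c =>
        (if counts.toArray.getD st.1.toNat 0 < c then st.2 else st.1, st.2 + 1)) (mb, i)).1
    = (PySem.List.enumerate l i).foldl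
        (fun mb p => if PySem.List.pyGetD counts mb 0 < p.2 then p.1 else mb) mb := by
  intro l
  induction l with
  | nil => intro mb i _ _; simp [PySem.List.enumerate_nil]
  | cons c l ih =>
    intro mb i hmb hi
    rw [PySem.List.enumerate_cons, List.foldl_cons, List.foldl_cons]
    simp only [arr_getD counts mb hmb]
    by_cases hc : PySem.List.pyGetD counts mb 0 < c
    · simp only [hc, if_true]
      exact ih i (i + 1) hi (by omega)
    · simp only [hc, if_false]
      exact ih mb (i + 1) hmb (by omega)

-- the Array fold of bestRoomB computes the pyGetD fold
theorem foldB_arr (counts : List Int) : ∀ (l : List Int) (best : Int), 0 ≤ best →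
    (∀ x ∈ l, 0 ≤ x) →
    l.foldl
      (fun best i =>
        if counts.toArray.getD best.toNat 0 < counts.toArray.getD i.toNat 0 then i else best) best
    = l.foldl
        (fun best i =>
          if PySem.List.pyGetD counts best 0 < PySem.List.pyGetD counts i 0 then i else best)
        best := by
  intro l
  induction l with
  | nil => intro best _ _; rfl
  | cons x l ih =>
    intro best hb hall
    rw [List.foldl_cons, List.foldl_cons]
    rw [arr_getD counts best hb, arr_getD counts x (hall x (by simp))]
    by_cases hc : PySem.List.pyGetD counts best 0 < PySem.List.pyGetD counts x 0
    · simp only [hc, if_true]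
      exact ih x (hall x (by simp)) (fun y hy => hall y (by simp [hy]))
    · simp only [hc, if_false]
      exact ih best hb (fun y hy => hall y (by simp [hy]))

theorem final_eq : ∀ (N : Int) (counts : List Int), counts.length = N.toNat →
    mostBookedA counts = bestRoomB N counts := by
  intro N counts hlen
  unfold mostBookedA mostBookedALoop bestRoomB bestRoomBLoop
  rw [fold_arrA counts counts 0 0 (by omega) (by omega)]
  rw [foldB_arr counts (PySem.List.pyRange 0 N 1) 0 (by omega)
    (fun x hx => by have := (PySem.List.mem_pyRange_one).mp hx; omega)]
  rw [PySem.List.enumerate_eq_map_pyRange counts 0, List.foldl_map]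
  rcases Int.lt_or_le N 0 with hN | hN
  swap
  · have h1 : PySem.List.len counts = N := by simp [hlen]; omega
    rw [h1]
  · have hc : counts = [] := List.eq_nil_of_length_eq_zero (by omega)
    subst hc
    rw [PySem.List.pyRange_one_eq_nil (by omega : N ≤ (0 : Int))]
    simp


-- ===== VERDICT (by name: the statement is the Claim_ definition above) =====
theorem find_busiest_room_spec : Claim_equal_find_busiest_room := by
  intro N meetings _hdom hpre
  obtain ⟨hm2, hne⟩ := hpre
  unfold Spec_find_busiest_room find_busiest_room find_busiest_room_alt
  have hinit : InvAB N.toNat (PySem.List.pyRange 0 N 1, [], List.replicate N.toNat 0)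
      (List.replicate N.toNat false, List.replicate N.toNat 0, List.replicate N.toNat 0) := by
    refine ⟨by simp, by simp, rfl, ?_, by simp, ?_⟩
    · simp only
      rcases Int.lt_or_le N 0 with hN | hN
      swap
      · rw [freeOf_replicate]
        congr 1
        omega
      · rw [show N.toNat = 0 by omega]
        rw [PySem.List.pyRange_one_eq_nil (by omega : N ≤ (0 : Int))]
        rfl
    · simp only [pairsOf_replicate_false]
      exact List.Perm.refl _
  rcases hne with rfl | hN1
  · simp only [List.foldl_nil]
    exact final_eq N _ (by simp)
  · have hfold := foldAB N.toNat (by omega) meetings hm2 _ _ hinit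
    have hcnt := hfold.2.2.1
    simp only at hcnt
    rw [hcnt]
    refine final_eq N _ ?_
    rw [foldl_stepB_counts_len]
    simp
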